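-- pv_equiv track=rewrite | github.com/colehanan1/Ramanlab-Auto-Data-Analysis | scripts/analysis/envelope_combined.py | _match_hint
-- ===== SOURCE A (Python) =====
-- from typing import Iterable, Iterator, Mapping, MutableMapping, Optional, Sequence
--
-- def _match_hint(tokens: Iterable[str], hints: Sequence[str]) -> tuple[int, str] | None:
--     """Return the longest hint prefix that matches any token."""
--
--     best: tuple[int, str] | None = None
--     for hint in hints:
--         for token in tokens:
--             if token == hint or token.startswith(hint):
--                 candidate = (len(hint), hint)
--                 if best is None or candidate[0] > best[0]:
--                     best = candidate
--     return best
-- ===== SOURCE B (Python) =====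
-- def _match_hint(tokens, hints):
--     """Return the longest hint prefix that matches any token."""
--     prefixes = {t[:k] for t in tokens for k in range(len(t) + 1)}
--     best = None
--     for hint in hints:
--         if hint in prefixes and (best is None or len(hint) > best[0]):
--             best = (len(hint), hint)
--     return best
-- ===== Notes on version B (the rewrite author's own statement) =====
-- stated objective: faster
-- what changed: B replaces A's nested hints-by-tokens scan with a hash set of all token prefixes built once, then a single pass over the hints with O(1) membership tests.
import Mathlib
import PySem

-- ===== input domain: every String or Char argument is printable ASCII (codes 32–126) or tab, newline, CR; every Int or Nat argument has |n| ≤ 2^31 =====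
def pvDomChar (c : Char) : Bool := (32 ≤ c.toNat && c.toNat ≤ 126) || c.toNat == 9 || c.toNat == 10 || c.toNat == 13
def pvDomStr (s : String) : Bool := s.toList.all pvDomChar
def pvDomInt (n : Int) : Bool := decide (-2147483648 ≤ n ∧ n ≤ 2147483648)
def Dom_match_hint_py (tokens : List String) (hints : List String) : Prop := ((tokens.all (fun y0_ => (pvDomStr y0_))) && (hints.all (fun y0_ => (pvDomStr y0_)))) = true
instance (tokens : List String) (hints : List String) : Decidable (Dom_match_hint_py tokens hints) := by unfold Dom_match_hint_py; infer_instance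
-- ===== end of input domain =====

-- B replaces A's nested hint×token scans by one hash set of all token prefixes
-- built once, then a single pass over the hints (objective: faster, H·T → H+T·L lookups).

-- ===== PORT A =====
def match_hint_py (tokens : List String) (hints : List String) : Option (Int × String) :=
  hints.foldl (fun best hint =>
    tokens.foldl (fun best token =>
      if token = hint ∨ PySem.Str.startswith token hint = true then
        let candidate : Int × String := (PySem.Str.len hint, hint)
        match best with
        | none => some candidate
        | some b => if candidate.1 > b.1 then some candidate else some b
      else best) best) none

-- ===== PORT B =====
def match_hint_py_alt (tokens : List String) (hints : List String) : Option (Int × String) :=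
  let prefixes : PySem.Set String :=
    PySem.Set.ofList (tokens.flatMap (fun t =>
      (PySem.List.pyRange 0 (PySem.Str.len t + 1)).map (fun k => PySem.Str.slice t none (some k))))
  hints.foldl (fun best hint =>
    if PySem.Set.contains prefixes hint = true then
      match best with
      | none => some (PySem.Str.len hint, hint)
      | some b => if PySem.Str.len hint > b.1 then some (PySem.Str.len hint, hint) else some b
    else best) none

-- ===== PRECONDITION & SPEC =====
def Spec_match_hint_py (tokens : List String) (hints : List String) (out : Option (Int × String)) : Prop := out = match_hint_py_alt tokens hints
instance (tokens : List String) (hints : List String) (out : Option (Int × String)) : Decidable (Spec_match_hint_py tokens hints out) := by unfold Spec_match_hint_py; infer_instance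

-- ===== CLAIM (what is proved, stated in full; the proofs are below) =====
def Claim_equal_match_hint_py : Prop := ∀ (tokens : List String) (hints : List String), Dom_match_hint_py tokens hints → Spec_match_hint_py tokens hints (match_hint_py tokens hints)

-- ===== LEMMAS AND PROOFS =====

/-- The update A performs when a hint matches some token. -/
def pvUpd (h : String) (best : Option (Int × String)) : Option (Int × String) :=
  match best with
  | none => some (PySem.Str.len h, h)
  | some b => if PySem.Str.len h > b.1 then some (PySem.Str.len h, h) else some b

/-- A's inner-loop step, named. -/
def pvStep (h : String) (best : Option (Int × String)) (token : String) : Option (Int × String) :=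
  if token = h ∨ PySem.Str.startswith token h = true then pvUpd h best else best

lemma pvUpd_idem (h : String) (best : Option (Int × String)) :
    pvUpd h (pvUpd h best) = pvUpd h best := by
  cases best with
  | none =>
      show pvUpd h (some (PySem.Str.len h, h)) = _
      unfold pvUpd
      simp
  | some b =>
      have h1 : ∀ c : Int × String,
          pvUpd h (some c) = if PySem.Str.len h > c.1 then some (PySem.Str.len h, h) else some c :=
        fun c => rfl
      rw [h1 b]
      by_cases hb : PySem.Str.len h > b.1
      · rw [if_pos hb, h1]
        simp
      · rw [if_neg hb, h1 b, if_neg hb]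

/-- A's inner loop over tokens applies `pvUpd h` once iff some token matches. -/
lemma innerA (h : String) (tokens : List String) (best : Option (Int × String)) :
    tokens.foldl (pvStep h) best
    = if tokens.any (fun t => decide (t = h) || PySem.Str.startswith t h) then pvUpd h best else best := by
  induction tokens generalizing best with
  | nil => simp
  | cons t ts ih =>
      rw [List.foldl_cons, List.any_cons]
      by_cases hm : t = h ∨ PySem.Str.startswith t h = true
      · have hstep : pvStep h best t = pvUpd h best := by unfold pvStep; rw [if_pos hm]
        have hb : (decide (t = h) || PySem.Str.startswith t h) = true := by
          rcases hm with hm | hm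
          · subst hm; simp
          · rw [hm]; simp
        rw [hstep, hb, Bool.true_or, if_pos rfl, ih]
        split
        · exact pvUpd_idem h best
        · rfl
      · have h1 : decide (t = h) = false := decide_eq_false (fun he => hm (Or.inl he))
        have h2 : PySem.Str.startswith t h = false := by
          cases heq : PySem.Str.startswith t h
          · rfl
          · exact absurd (Or.inr heq) hm
        have hstep : pvStep h best t = best := by unfold pvStep; rw [if_neg hm]
        rw [hstep, ih]
        simp only [h1, h2, Bool.false_or]

/-- A hint matches some token iff it is a member of B's prefix set. -/
lemma match_iff_mem_pref (tokens : List String) (h : String) :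
    (tokens.any (fun t => decide (t = h) || PySem.Str.startswith t h))
    = PySem.Set.contains
        (PySem.Set.ofList (tokens.flatMap (fun t =>
          (PySem.List.pyRange 0 (PySem.Str.len t + 1)).map (fun k => PySem.Str.slice t none (some k))))) h := by
  rw [Bool.eq_iff_iff]
  constructor
  · intro hx
    rw [List.any_eq_true] at hx
    obtain ⟨t, ht, hm⟩ := hx
    have hpref : h.toList <+: t.toList := by
      rcases Bool.or_eq_true .. |>.mp hm with hm | hm
      · have := of_decide_eq_true hm; subst this; exact List.prefix_refl _
      · rw [PySem.Str.startswith_eq] at hm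
        exact (PySem.Chars.startswith_iff _ _).mp hm
    have hlen : h.toList.length ≤ t.toList.length := hpref.length_le
    have hslice : PySem.Str.slice t none (some (h.toList.length : Int)) = h := by
      rw [← String.toList_inj, PySem.Str.toList_slice, PySem.Chars.slice_eq_listSlice,
        PySem.List.slice_to_natCast]
      exact (List.prefix_iff_eq_take.mp hpref).symm
    simp only [PySem.Set.contains, List.contains_iff_mem, PySem.Set.mem_ofList,
      List.mem_flatMap]
    refine ⟨t, ht, ?_⟩
    rw [List.mem_map]
    refine ⟨(h.toList.length : Int), ?_, hslice⟩
    rw [PySem.List.mem_pyRange_one, PySem.Str.len_eq]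
    constructor
    · positivity
    · exact_mod_cast Nat.lt_succ_of_le hlen
  · intro hx
    simp only [PySem.Set.contains, List.contains_iff_mem, PySem.Set.mem_ofList,
      List.mem_flatMap, List.mem_map] at hx
    obtain ⟨t, ht, k, hk, hsl⟩ := hx
    rw [PySem.List.mem_pyRange_one] at hk
    have hk0 : k = ((k.toNat : Nat) : Int) := (Int.toNat_of_nonneg hk.1).symm
    have hpref : h.toList <+: t.toList := by
      rw [← hsl, PySem.Str.toList_slice, PySem.Chars.slice_eq_listSlice, hk0,
        PySem.List.slice_to_natCast]
      exact List.take_prefix _ _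
    rw [List.any_eq_true]
    refine ⟨t, ht, ?_⟩
    have hsw : PySem.Str.startswith t h = true := by
      rw [PySem.Str.startswith_eq]
      exact (PySem.Chars.startswith_iff _ _).mpr hpref
    rw [Bool.or_eq_true]
    exact Or.inr hsw

-- ===== VERDICT (by name: the statement is the Claim_ definition above) =====
theorem match_hint_py_spec : Claim_equal_match_hint_py := by
  intro tokens hints _
  show match_hint_py tokens hints = match_hint_py_alt tokens hints
  unfold match_hint_py match_hint_py_alt
  show hints.foldl _ none = hints.foldl _ none
  congr 1
  funext best h
  show tokens.foldl (pvStep h) best = _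
  rw [innerA h tokens best, match_iff_mem_pref tokens h]
  split
  · show pvUpd h best = pvUpd h best
    rfl
  · rfl
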